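-- pv_equiv track=rewrite | github.com/mohamedadly1/CipherX | vigenere_cipher.py | generate_repeated_key
-- ===== SOURCE A (Python) =====
-- def generate_repeated_key(key, text):
--       key_without_spaces = key.replace(" ", "")
--       repeated_key = ''
--       space_index = 0
--       for char in text:
--           if char != ' ':
--               repeated_key += key_without_spaces[space_index % len(key_without_spaces)]
--               space_index += 1
--           else:
--               repeated_key += ' '
--       return repeated_key
-- ===== SOURCE B (Python) =====
-- def generate_repeated_key(key, text):
--     kws = key.replace(" ", "")
--     n = len([c for c in text if c != ' '])
--     cycled = (kws * (n // len(kws) + 1))[:n] if n != 0 else ''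
--     out = []
--     i = 0
--     for char in text:
--         if char == ' ':
--             out.append(' ')
--         else:
--             out.append(cycled[i])
--             i += 1
--     return ''.join(out)
-- ===== Notes on version B (the rewrite author's own statement) =====
-- stated objective: alternative
-- what changed: B precomputes the whole aligned key in one shot (count non-space chars, tile the space-free key and truncate) and then does a single indexing pass collected with join, instead of A's per-character modular arithmetic with repeated string concatenation.
import Mathlib
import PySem

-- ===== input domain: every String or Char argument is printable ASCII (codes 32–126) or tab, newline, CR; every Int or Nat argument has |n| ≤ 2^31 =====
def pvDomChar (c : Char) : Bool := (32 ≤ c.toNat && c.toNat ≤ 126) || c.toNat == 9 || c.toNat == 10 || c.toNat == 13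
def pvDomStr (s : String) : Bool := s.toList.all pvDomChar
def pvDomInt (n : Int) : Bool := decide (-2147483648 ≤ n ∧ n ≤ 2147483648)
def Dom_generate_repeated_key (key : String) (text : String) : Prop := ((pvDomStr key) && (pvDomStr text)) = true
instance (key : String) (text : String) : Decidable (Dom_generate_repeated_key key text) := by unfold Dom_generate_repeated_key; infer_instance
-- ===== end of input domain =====

-- B builds the whole aligned key once (tile the space-free key to the non-space count) and then
-- does one indexing pass, instead of A's per-character modular lookup; same value wherever A returns.

-- ===== PORT A =====
def generate_repeated_key (key : String) (text : String) : String :=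
  let key_without_spaces := (PySem.Str.replace key " " "").toList
  let st := text.toList.foldl
    (fun (st : List Char × Int) char =>
      if char ≠ ' ' then
        (st.1 ++ [PySem.List.pyGetD key_without_spaces
            (PySem.Int.mod st.2 (key_without_spaces.length : Int)) ' '], st.2 + 1)
      else
        (st.1 ++ [' '], st.2))
    ([], 0)
  String.ofList st.1

-- ===== PORT B =====
def generate_repeated_key_alt (key : String) (text : String) : String :=
  let kws := (PySem.Str.replace key " " "").toList
  let n : Int := ((text.toList.filter (fun c => c ≠ ' ')).length : Int)
  let cycled : List Char :=
    if n ≠ 0 then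
      PySem.List.slice
        ((List.replicate (PySem.Int.floordiv n (kws.length : Int) + 1).toNat kws).flatten)
        none (some n)
    else []
  let st := text.toList.foldl
    (fun (st : List Char × Int) char =>
      if char = ' ' then
        (st.1 ++ [' '], st.2)
      else
        (st.1 ++ [PySem.List.pyGetD cycled st.2 ' '], st.2 + 1))
    ([], 0)
  String.ofList st.1

-- ===== PRECONDITION & SPEC =====
-- Pre_ excludes exactly the inputs where A raises ZeroDivisionError ('space_index % 0'):
-- key has no non-space character while text has one. B raises there too.
def Pre_generate_repeated_key (key : String) (text : String) : Prop :=
  key.toList.any (fun c => decide (c ≠ ' ')) = true ∨ text.toList.all (fun c => decide (c = ' ')) = true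
instance (key : String) (text : String) : Decidable (Pre_generate_repeated_key key text) := by
  unfold Pre_generate_repeated_key; infer_instance
def pvWitness_generate_repeated_key : String × String := ("KEY", "HELLO WORLD")

def Spec_generate_repeated_key (key : String) (text : String) (out : String) : Prop := out = generate_repeated_key_alt key text
instance (key : String) (text : String) (out : String) : Decidable (Spec_generate_repeated_key key text out) := by unfold Spec_generate_repeated_key; infer_instance

-- ===== CLAIM (what is proved, stated in full; the proofs are below) =====
def Claim_equal_generate_repeated_key : Prop := ∀ (key : String) (text : String), Dom_generate_repeated_key key text → Pre_generate_repeated_key key text → Spec_generate_repeated_key key text (generate_repeated_key key text)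

-- ===== LEMMAS AND PROOFS =====

-- replace with old = " " and new = "" is exactly filtering the spaces out
theorem pv_replace_go_filter (fuel : Nat) (l acc : List Char) (h : l.length ≤ fuel) :
    PySem.Chars.replace.go [' '] [] fuel l acc = acc.reverse ++ l.filter (fun c => c ≠ ' ') := by
  induction fuel generalizing l acc with
  | zero =>
    cases l with
    | nil => simp [PySem.Chars.replace.go]
    | cons c t => simp at h
  | succ fuel ih =>
    cases l with
    | nil => simp [PySem.Chars.replace.go]
    | cons c t =>
      simp only [PySem.Chars.replace.go]
      by_cases hc : c = ' '
      · subst hc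
        simp only [List.isPrefixOf, beq_self_eq_true, Bool.true_and, if_pos]
        rw [ih _ _ (by simpa using Nat.le_of_succ_le_succ h)]
        simp
      · have hpre : List.isPrefixOf [' '] (c :: t) = false := by
          simp [List.isPrefixOf]
          intro hcc; exact hc hcc.symm
        rw [hpre]
        simp only [Bool.false_eq_true, if_false]
        rw [ih _ _ (by simpa using Nat.le_of_succ_le_succ h)]
        simp [hc]

theorem pv_replace_filter (cs : List Char) :
    PySem.Chars.replace cs [' '] [] = cs.filter (fun c => c ≠ ' ') := by
  simpa using pv_replace_go_filter cs.length cs [] le_rfl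

theorem pv_kws_eq (key : String) :
    (PySem.Str.replace key " " "").toList = key.toList.filter (fun c => c ≠ ' ') := by
  rw [PySem.Str.toList_replace]
  simpa using pv_replace_filter key.toList

-- indexing a tiled list is modular indexing of the tile
theorem pv_flatten_replicate_getD (kws : List Char) (hk : kws ≠ []) (m i : Nat) (d : Char)
    (h : i < m * kws.length) :
    ((List.replicate m kws).flatten).getD i d = kws.getD (i % kws.length) d := by
  have hL : 0 < kws.length := List.length_pos_iff.mpr hk
  induction m generalizing i with
  | zero => simp at h
  | succ m ih =>
    rw [List.replicate_succ, List.flatten_cons]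
    by_cases hi : i < kws.length
    · rw [List.getD_eq_getElem?_getD, List.getElem?_append_left hi,
        ← List.getD_eq_getElem?_getD, Nat.mod_eq_of_lt hi]
    · have hi' : kws.length ≤ i := Nat.le_of_not_lt hi
      rw [List.getD_eq_getElem?_getD, List.getElem?_append_right hi',
        ← List.getD_eq_getElem?_getD]
      have h' : i - kws.length < m * kws.length := by
        have hs : (m + 1) * kws.length = m * kws.length + kws.length := by ring
        omega
      rw [ih _ h']
      congr 1
      rw [Nat.mod_eq_sub_mod hi']

-- B's cycled list agrees with A's modular lookup at every index below the non-space count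
theorem pv_cycled_getD (kws : List Char) (hk : kws ≠ []) (N i : Nat) (hi : i < N) :
    PySem.List.pyGetD
      (PySem.List.slice
        ((List.replicate (PySem.Int.floordiv (N : Int) (kws.length : Int) + 1).toNat kws).flatten)
        none (some (N : Int))) (i : Int) ' '
    = PySem.List.pyGetD kws (PySem.Int.mod (i : Int) (kws.length : Int)) ' ' := by
  have hL : 0 < kws.length := List.length_pos_iff.mpr hk
  rw [PySem.List.slice_to_natCast]
  rw [PySem.Int.floordiv_natCast, PySem.Int.mod_natCast]
  rw [PySem.List.pyGetD_natCast, PySem.List.pyGetD_natCast]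
  have hcast : ((N / kws.length : Nat) : Int) + 1 = (((N / kws.length + 1 : Nat)) : Int) := by
    push_cast; ring
  rw [hcast, Int.toNat_natCast]
  have hiN : i < (N / kws.length + 1) * kws.length := by
    have h1 : kws.length * (N / kws.length) + N % kws.length = N := Nat.div_add_mod N kws.length
    rw [Nat.mul_comm] at h1
    have h2 : N % kws.length < kws.length := Nat.mod_lt N hL
    have h3 : (N / kws.length + 1) * kws.length
        = N / kws.length * kws.length + kws.length := by ring
    omega
  rw [List.getD_eq_getElem?_getD, List.getElem?_take_of_lt hi, ← List.getD_eq_getElem?_getD]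
  exact pv_flatten_replicate_getD kws hk _ i ' ' hiN

-- the two loops agree from any aligned state, provided the index never outruns the lookup table
theorem pv_loop_eq (kws cycled : List Char) (N : Nat)
    (hcyc : ∀ i : Nat, i < N →
      PySem.List.pyGetD cycled (i : Int) ' '
        = PySem.List.pyGetD kws (PySem.Int.mod (i : Int) (kws.length : Int)) ' ')
    (ts : List Char) (j : Nat) (acc : List Char)
    (hle : j + (ts.filter (fun c => c ≠ ' ')).length ≤ N) :
    ts.foldl
      (fun (st : List Char × Int) char =>
        if char ≠ ' ' then
          (st.1 ++ [PySem.List.pyGetD kws (PySem.Int.mod st.2 (kws.length : Int)) ' '], st.2 + 1)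
        else (st.1 ++ [' '], st.2)) (acc, (j : Int))
    = ts.foldl
      (fun (st : List Char × Int) char =>
        if char = ' ' then (st.1 ++ [' '], st.2)
        else (st.1 ++ [PySem.List.pyGetD cycled st.2 ' '], st.2 + 1)) (acc, (j : Int)) := by
  induction ts generalizing j acc with
  | nil => rfl
  | cons c t ih =>
    by_cases hc : c = ' '
    · subst hc
      simp only [List.foldl_cons, ne_eq, not_true_eq_false, if_false, ite_true]
      exact ih j _ (by simpa using hle)
    · have hflt : (List.filter (fun c => decide (c ≠ ' ')) (c :: t)).length
          = (List.filter (fun c => decide (c ≠ ' ')) t).length + 1 := by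
        rw [List.filter_cons, if_pos (by simp [hc])]
        simp
      rw [hflt] at hle
      have hjN : j < N := by omega
      simp only [List.foldl_cons]
      rw [if_pos hc, if_neg hc, hcyc j hjN]
      have hj1 : ((j : Int) + 1) = ((j + 1 : Nat) : Int) := by push_cast; ring
      rw [hj1]
      exact ih (j + 1) _ (by omega)

-- ===== VERDICT (by name: the statement is the Claim_ definition above) =====
theorem generate_repeated_key_spec : Claim_equal_generate_repeated_key := by
  intro key text _ hpre
  unfold Spec_generate_repeated_key generate_repeated_key generate_repeated_key_alt
  simp only []
  set kws := (PySem.Str.replace key " " "").toList with hkwsdef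
  set N := (text.toList.filter (fun c => c ≠ ' ')).length with hNdef
  have hkne : N ≠ 0 → kws ≠ [] := by
    rcases hpre with hkey | hall
    · obtain ⟨c, hc, hne⟩ := List.any_eq_true.mp hkey
      have hne' : c ≠ ' ' := of_decide_eq_true hne
      intro _
      rw [hkwsdef, pv_kws_eq key]
      intro hnil
      have : c ∈ key.toList.filter (fun c => c ≠ ' ') := by
        simp [List.mem_filter, hc, hne']
      rw [hnil] at this
      exact absurd this (List.not_mem_nil)
    · intro hN
      exfalso
      apply hN
      rw [hNdef]
      have : text.toList.filter (fun c => c ≠ ' ') = [] := by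
        apply List.filter_eq_nil_iff.mpr
        intro c hc
        have := of_decide_eq_true (List.all_eq_true.mp hall c hc)
        simp [this]
      rw [this]; rfl
  have h0 : (0 : Int) = ((0 : Nat) : Int) := by norm_num
  by_cases hN : N = 0
  · have hguard : ¬ ((N : Int) ≠ 0) := by simp [hN]
    rw [if_neg hguard, h0]
    rw [pv_loop_eq kws [] N (fun i hi => absurd hi (by omega)) text.toList 0 [] (by omega)]
  · rw [if_pos (by exact_mod_cast hN), h0]
    rw [pv_loop_eq kws _ N (fun i hi => pv_cycled_getD kws (hkne hN) N i hi) text.toList 0 []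
      (by omega)]
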